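-- pv_equiv track=rewrite | github.com/vskarleas/INF101-S1-Python | TP Exercises/TP 7/abdel_exercise.py | derniere_consone
-- ===== SOURCE A (Python) =====
-- def derniere_consone(mot):
--     liste = list(mot)
--     voyelle = ["a", "e", "i", "o", "u"]
--     for i in range(len(liste)):
--         if liste[i] not in voyelle:
--             index = i
--             consonne = liste[i]
--
--     return index, consonne
-- ===== SOURCE B (Python) =====
-- def derniere_consone(mot):
--     voyelle = ["a", "e", "i", "o", "u"]
--     for i in range(len(mot) - 1, -1, -1):
--         if mot[i] not in voyelle:
--             index = i
--             consonne = mot[i]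
--             break
--     return index, consonne
-- ===== Notes on version B (the rewrite author's own statement) =====
-- stated objective: faster
-- what changed: B scans from the right and breaks at the first non-vowel instead of A's full forward sweep that keeps overwriting the last one found.
-- outside the precondition, e.g. on derniere_consone('aie'): A raises UnboundLocalError, B raises UnboundLocalError
import Mathlib
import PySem

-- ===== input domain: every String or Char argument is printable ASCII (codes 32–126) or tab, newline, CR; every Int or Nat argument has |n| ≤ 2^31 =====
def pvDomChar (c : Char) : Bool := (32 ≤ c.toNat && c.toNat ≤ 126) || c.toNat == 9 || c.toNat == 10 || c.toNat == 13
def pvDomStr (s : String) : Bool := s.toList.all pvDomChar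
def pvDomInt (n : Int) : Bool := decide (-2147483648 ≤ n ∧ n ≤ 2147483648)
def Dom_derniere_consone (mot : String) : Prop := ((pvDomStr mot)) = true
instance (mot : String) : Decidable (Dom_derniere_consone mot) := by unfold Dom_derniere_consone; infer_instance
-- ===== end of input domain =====

-- B changes the traversal: a reverse scan that stops at the first non-vowel, instead of A's
-- full forward sweep overwriting the last one found.  Return-value equivalence on Pre_.

-- ===== PORT A =====
-- 'not in voyelle' test
def pvVoyelle (c : Char) : Bool := c ∈ ['a', 'e', 'i', 'o', 'u']

-- A's forward loop: st holds the latest (index, consonne) assigned, none = still unbound.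
def pvAGo : List Char → Int → Option (Int × String) → Option (Int × String)
  | [], _, st => st
  | c :: rest, i, st => pvAGo rest (i + 1) (if pvVoyelle c then st else some (i, String.mk [c]))

-- the all-vowel case raises UnboundLocalError in Python; it is outside Pre_, default (0, "")
def derniere_consone (mot : String) : Int × String :=
  (pvAGo mot.toList 0 none).getD (0, "")

-- ===== PORT B =====
-- B's reverse loop: scan indices n-1, …, 0, return at the first non-vowel (break).
def pvBGo (l : List Char) : Nat → Option (Int × String)
  | 0 => none
  | n + 1 =>
    let c := (l[n]?).getD ' '  -- index always in range when called with n ≤ l.length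
    if pvVoyelle c then pvBGo l n else some ((n : Int), String.mk [c])

def derniere_consone_alt (mot : String) : Int × String :=
  (pvBGo mot.toList mot.toList.length).getD (0, "")

-- ===== PRECONDITION & SPEC =====
-- Pre_ excludes inputs with no non-vowel character (empty or all of "aeiou"):
-- there Python A (and B) raises UnboundLocalError.
def Pre_derniere_consone (mot : String) : Prop :=
  (mot.toList.any (fun c => !pvVoyelle c)) = true
instance (mot : String) : Decidable (Pre_derniere_consone mot) := by
  unfold Pre_derniere_consone; infer_instance

def pvWitness_derniere_consone : String := "bonjour"

def Spec_derniere_consone (mot : String) (out : Int × String) : Prop := out = derniere_consone_alt mot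
instance (mot : String) (out : Int × String) : Decidable (Spec_derniere_consone mot out) := by unfold Spec_derniere_consone; infer_instance

-- ===== CLAIM (what is proved, stated in full; the proofs are below) =====
def Claim_equal_derniere_consone : Prop := ∀ (mot : String), Dom_derniere_consone mot → Pre_derniere_consone mot → Spec_derniere_consone mot (derniere_consone mot)

-- ===== LEMMAS AND PROOFS =====

theorem pvAGo_append (l1 l2 : List Char) (i : Int) (st : Option (Int × String)) :
    pvAGo (l1 ++ l2) i st = pvAGo l2 (i + l1.length) (pvAGo l1 i st) := by
  induction l1 generalizing i st with
  | nil => simp [pvAGo]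
  | cons c rest ih =>
    simp only [List.cons_append, pvAGo, ih, List.length_cons]
    congr 1
    push_cast
    ring

theorem pvBGo_snoc_lt (l : List Char) (c : Char) (n : Nat) (h : n ≤ l.length) :
    pvBGo (l ++ [c]) n = pvBGo l n := by
  induction n with
  | zero => rfl
  | succ m ih =>
    have hm : m < l.length := by omega
    simp only [pvBGo, List.getElem?_append_left hm, ih (by omega)]

theorem pvGo_eq (l : List Char) : pvAGo l 0 none = pvBGo l l.length := by
  induction l using List.reverseRecOn with
  | nil => rfl
  | append_singleton l c ih =>
    rw [pvAGo_append]
    have hb : pvBGo (l ++ [c]) (l ++ [c]).length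
        = if pvVoyelle c then pvBGo l l.length else some ((l.length : Int), String.mk [c]) := by
      simp only [List.length_append, List.length_singleton, pvBGo,
        List.getElem?_append_right (Nat.le_refl l.length)]
      simp [pvBGo_snoc_lt l c l.length (Nat.le_refl _)]
    rw [hb, ← ih]
    by_cases hv : pvVoyelle c = true <;> simp [pvAGo, hv]

-- ===== VERDICT (by name: the statement is the Claim_ definition above) =====
theorem derniere_consone_spec : Claim_equal_derniere_consone := by
  intro mot _ _
  unfold Spec_derniere_consone derniere_consone derniere_consone_alt
  rw [pvGo_eq]
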